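-- pv_equiv track=rewrite | github.com/mci77777/vue-fastapi-admin | scripts/analyze_scripts.py | categorize_script
-- ===== SOURCE A (Python) =====
-- def categorize_script(file_name: str, description: str) -> str:
--     """根据文件名和描述分类脚本"""
--     name_lower = file_name.lower()
--     desc_lower = description.lower()
--
--     # JWT 相关
--     if any(x in name_lower for x in ['jwt', 'jwk', 'token']):
--         return "JWT验证"
--
--     # E2E 测试
--     if any(x in name_lower for x in ['e2e', 'anon', 'sse']):
--         return "E2E测试"
--
--     # Docker 相关
--     if 'docker' in name_lower:
--         return "Docker部署"
--
--     # Supabase 相关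
--     if 'supabase' in name_lower:
--         return "Supabase配置"
--
--     # 验证脚本
--     if any(x in name_lower for x in ['verify', 'check', 'validate']):
--         return "验证工具"
--
--     # 调试脚本
--     if any(x in name_lower for x in ['debug', 'diagnose']):
--         return "调试工具"
--
--     # 测试脚本
--     if 'test' in name_lower:
--         return "测试工具"
--
--     # K系列脚本
--     if name_lower.startswith('k'):
--         return "K系列工具"
--
--     return "其他工具"
-- ===== SOURCE B (Python) =====
-- # Different algorithm: instead of testing each keyword for containment, slide a
-- # window over the lowered name once and hash-probe each window in a keyword ->
-- # priority dict, keeping the smallest matched priority (= the first rule A hits).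
-- _KEYWORDS = {
--     'jwt': 0, 'jwk': 0, 'token': 0,
--     'e2e': 1, 'anon': 1, 'sse': 1,
--     'docker': 2,
--     'supabase': 3,
--     'verify': 4, 'check': 4, 'validate': 4,
--     'debug': 5, 'diagnose': 5,
--     'test': 6,
-- }
-- _CATEGORIES = ['JWT验证', 'E2E测试', 'Docker部署', 'Supabase配置', '验证工具', '调试工具', '测试工具']
-- _LENGTHS = (3, 4, 5, 6, 8)  # the distinct keyword lengths
--
--
-- def categorize_script(file_name: str, description: str) -> str:
--     name = file_name.lower()
--     best = None
--     for i in range(len(name)):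
--         for L in _LENGTHS:
--             p = _KEYWORDS.get(name[i:i + L])
--             if p is not None and (best is None or p < best):
--                 best = p
--     if best is not None:
--         return _CATEGORIES[best]
--     return 'K系列工具' if name.startswith('k') else '其他工具'
-- ===== Notes on version B (the rewrite author's own statement) =====
-- stated objective: alternative
-- what changed: Instead of testing each of the 14 keywords for containment in a fixed if-chain, B slides a window over the lowered name once, hash-probes each window (at the 5 distinct keyword lengths) in a keyword-to-priority dict, and keeps the smallest matched priority, which equals the first rule A's chain would hit; the unused desc_lower is dropped.
import Mathlib
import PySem

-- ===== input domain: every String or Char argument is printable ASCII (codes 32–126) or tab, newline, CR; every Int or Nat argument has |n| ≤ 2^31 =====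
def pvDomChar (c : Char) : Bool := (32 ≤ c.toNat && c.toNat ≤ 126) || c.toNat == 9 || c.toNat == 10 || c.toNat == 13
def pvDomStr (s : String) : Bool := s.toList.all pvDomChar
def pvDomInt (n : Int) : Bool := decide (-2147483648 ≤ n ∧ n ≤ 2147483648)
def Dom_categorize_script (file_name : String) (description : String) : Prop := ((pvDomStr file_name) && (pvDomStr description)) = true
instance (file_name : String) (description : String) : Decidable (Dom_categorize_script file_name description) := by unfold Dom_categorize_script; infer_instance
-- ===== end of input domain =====

-- B replaces A's per-keyword containment chain by one sliding-window scan of the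
-- lowered name that hash-probes each window in a keyword→priority map and keeps
-- the smallest matched priority (alternative algorithm, same cost class).

-- ===== PORT A =====
def categorize_script (file_name : String) (description : String) : String :=
  let name_lower := PySem.Str.lower file_name
  let _desc_lower := PySem.Str.lower description
  if ["jwt", "jwk", "token"].any (fun x => PySem.Str.isIn x name_lower) then "JWT验证"
  else if ["e2e", "anon", "sse"].any (fun x => PySem.Str.isIn x name_lower) then "E2E测试"
  else if PySem.Str.isIn "docker" name_lower then "Docker部署"
  else if PySem.Str.isIn "supabase" name_lower then "Supabase配置"
  else if ["verify", "check", "validate"].any (fun x => PySem.Str.isIn x name_lower) then "验证工具"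
  else if ["debug", "diagnose"].any (fun x => PySem.Str.isIn x name_lower) then "调试工具"
  else if PySem.Str.isIn "test" name_lower then "测试工具"
  else if PySem.Str.startswith name_lower "k" then "K系列工具"
  else "其他工具"

-- ===== PORT B =====
-- keyword → priority map (Source B's _KEYWORDS), keys as char lists
def pvKdict : List (List Char × Nat) :=
  [("jwt".toList, 0), ("jwk".toList, 0), ("token".toList, 0),
   ("e2e".toList, 1), ("anon".toList, 1), ("sse".toList, 1),
   ("docker".toList, 2),
   ("supabase".toList, 3),
   ("verify".toList, 4), ("check".toList, 4), ("validate".toList, 4),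
   ("debug".toList, 5), ("diagnose".toList, 5),
   ("test".toList, 6)]

def pvCats : List String :=
  ["JWT验证", "E2E测试", "Docker部署", "Supabase配置", "验证工具", "调试工具", "测试工具"]

def pvLens : List Nat := [3, 4, 5, 6, 8]

-- inner 'for L in _LENGTHS' loop at one window position
def pvCheckPos (best : Option Nat) (s : List Char) : Option Nat :=
  pvLens.foldl (fun b L =>
    match pvKdict.lookup (s.take L) with
    | some p =>
      match b with
      | none => some p
      | some q => if p < q then some p else some q
    | none => b) best

-- the 'for i in range(len(name))' loop: the recursion consumes one char per step,
-- so at step i the argument is name[i:] and take L gives the window name[i:i+L]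
def pvScan (best : Option Nat) : List Char → Option Nat
  | [] => best
  | c :: rest => pvScan (pvCheckPos best (c :: rest)) rest

def categorize_script_alt (file_name : String) (_description : String) : String :=
  let name := PySem.Str.lower file_name
  match pvScan none name.toList with
  | some p => PySem.List.pyGetD pvCats (p : Int) ""   -- _CATEGORIES[best]; p ≤ 6 < 7 always, so total form is exact
  | none => if PySem.Str.startswith name "k" then "K系列工具" else "其他工具"

-- ===== PRECONDITION & SPEC =====
def Spec_categorize_script (file_name : String) (description : String) (out : String) : Prop := out = categorize_script_alt file_name description
instance (file_name : String) (description : String) (out : String) : Decidable (Spec_categorize_script file_name description out) := by unfold Spec_categorize_script; infer_instance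

-- ===== CLAIM (what is proved, stated in full; the proofs are below) =====
def Claim_equal_categorize_script : Prop := ∀ (file_name : String) (description : String), Dom_categorize_script file_name description → Spec_categorize_script file_name description (categorize_script file_name description)

-- ===== LEMMAS AND PROOFS =====

-- priorities matched at one window position
def pvMatchesAt (s : List Char) : List Nat :=
  pvLens.filterMap (fun L => pvKdict.lookup (s.take L))

-- all priorities matched anywhere in cs
def pvAll (cs : List Char) : List Nat := cs.tails.flatMap pvMatchesAt

-- the fold B's inner loop performs, as a running minimum
def pvRunMin (b : Option Nat) (ps : List Nat) : Option Nat :=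
  ps.foldl (fun b p => some (match b with | none => p | some q => min q p)) b

lemma pvRunMin_append (b : Option Nat) (ps qs : List Nat) :
    pvRunMin (pvRunMin b ps) qs = pvRunMin b (ps ++ qs) :=
  (List.foldl_append).symm

lemma pvFold_filterMap (f : Nat → Option Nat) (ls : List Nat) (b : Option Nat) :
    ls.foldl (fun b L =>
      match f L with
      | some p =>
        match b with
        | none => some p
        | some q => if p < q then some p else some q
      | none => b) b
    = pvRunMin b (ls.filterMap f) := by
  induction ls generalizing b with
  | nil => rfl
  | cons L ls ih =>
    cases hf : f L with
    | none =>
      simp only [List.foldl_cons, List.filterMap_cons, hf]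
      exact ih b
    | some p =>
      simp only [List.foldl_cons, List.filterMap_cons, hf]
      have hstep : (match b with
          | none => some p
          | some q => if p < q then some p else some q)
          = some (match b with | none => p | some q => min q p) := by
        rcases b with _ | q
        · rfl
        · simp only [Nat.min_def]
          split_ifs <;> simp <;> omega
      rw [ih, hstep]
      rfl

lemma pvCheckPos_eq (b : Option Nat) (s : List Char) :
    pvCheckPos b s = pvRunMin b (pvMatchesAt s) := by
  unfold pvCheckPos pvMatchesAt
  exact pvFold_filterMap _ pvLens b

lemma pvScan_eq (b : Option Nat) (cs : List Char) :
    pvScan b cs = pvRunMin b (pvAll cs) := by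
  induction cs generalizing b with
  | nil => rfl
  | cons c rest ih =>
    rw [pvScan, ih, pvCheckPos_eq, pvRunMin_append]
    rfl

lemma pvRunMin_some (q : Nat) (ps : List Nat) :
    pvRunMin (some q) ps = some (ps.foldl min q) := by
  induction ps generalizing q with
  | nil => rfl
  | cons p ps ih => simpa [pvRunMin] using ih (min q p)

lemma pvRunMin_none_eq_min? (ps : List Nat) : pvRunMin none ps = ps.min? := by
  cases ps with
  | nil => rfl
  | cons p ps => rw [List.min?_cons']; simpa [pvRunMin] using pvRunMin_some p ps

lemma pvLookup_mem {l : List (List Char × Nat)} {k : List Char} {v : Nat}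
    (h : l.lookup k = some v) : (k, v) ∈ l := by
  induction l with
  | nil => simp [List.lookup] at h
  | cons hd tl ih =>
    rw [List.lookup] at h
    by_cases hk : k == hd.1
    · cases hd with
      | mk a b =>
        simp at hk
        simp [hk] at h
        subst hk; subst h; exact List.mem_cons_self
    · simp [hk] at h
      exact List.mem_cons_of_mem _ (ih h)

-- every matched priority names a keyword of that priority occurring in cs
lemma pvAll_forward {p : Nat} {cs : List Char} (h : p ∈ pvAll cs) :
    ∃ kw, (kw, p) ∈ pvKdict ∧ kw <:+: cs := by
  rw [pvAll, List.mem_flatMap] at h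
  obtain ⟨s, hs, hp⟩ := h
  rw [pvMatchesAt, List.mem_filterMap] at hp
  obtain ⟨L, _, hl⟩ := hp
  refine ⟨s.take L, pvLookup_mem hl, ?_⟩
  exact List.infix_iff_prefix_suffix.mpr ⟨s, List.take_prefix L s, (List.mem_tails s cs).mp hs⟩

-- concrete facts about the dictionary
lemma pvKdict_self_lookup : ∀ pr ∈ pvKdict, pvKdict.lookup pr.1 = some pr.2 ∧ pr.1.length ∈ pvLens := by decide

lemma pvKdict_le_six : ∀ pr ∈ pvKdict, pr.2 ≤ 6 := by decide

-- every keyword occurrence contributes its priority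
lemma pvAll_reverse {p : Nat} {kw cs : List Char} (hm : (kw, p) ∈ pvKdict)
    (hi : kw <:+: cs) : p ∈ pvAll cs := by
  obtain ⟨t, hpre, hsuf⟩ := List.infix_iff_prefix_suffix.mp hi
  rw [pvAll, List.mem_flatMap]
  refine ⟨t, (List.mem_tails t cs).mpr hsuf, ?_⟩
  rw [pvMatchesAt, List.mem_filterMap]
  obtain ⟨hlook, hlen⟩ := pvKdict_self_lookup _ hm
  refine ⟨kw.length, hlen, ?_⟩
  rw [← List.prefix_iff_eq_take.mp hpre]
  exact hlook

-- group-match propositions: group i has a keyword occurring in cs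
def pvGm (i : Nat) (cs : List Char) : Prop := ∃ kw, (kw, i) ∈ pvKdict ∧ kw <:+: cs

lemma pvAll_min_some {i : Nat} {cs : List Char} (hi : pvGm i cs)
    (hlt : ∀ q, pvGm q cs → i ≤ q) : (pvAll cs).min? = some i := by
  rw [List.min?_eq_some_iff]
  constructor
  · obtain ⟨kw, hm, hinf⟩ := hi
    exact pvAll_reverse hm hinf
  · intro q hq
    obtain ⟨kw, hm, hinf⟩ := pvAll_forward hq
    exact hlt q ⟨kw, hm, hinf⟩

lemma pvAll_min_none {cs : List Char} (h : ∀ q, ¬ pvGm q cs) : (pvAll cs).min? = none := by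
  rw [List.min?_eq_none_iff, List.eq_nil_iff_forall_not_mem]
  intro q hq
  exact h q (pvAll_forward hq)

-- bridge each of A's boolean tests to pvGm
lemma pvGm0 (s : List Char) : pvGm 0 s ↔ ("jwt".toList <:+: s ∨ "jwk".toList <:+: s ∨ "token".toList <:+: s) := by
  unfold pvGm pvKdict; simp
lemma pvGm1 (s : List Char) : pvGm 1 s ↔ ("e2e".toList <:+: s ∨ "anon".toList <:+: s ∨ "sse".toList <:+: s) := by
  unfold pvGm pvKdict; simp
lemma pvGm2 (s : List Char) : pvGm 2 s ↔ "docker".toList <:+: s := by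
  unfold pvGm pvKdict; simp
lemma pvGm3 (s : List Char) : pvGm 3 s ↔ "supabase".toList <:+: s := by
  unfold pvGm pvKdict; simp
lemma pvGm4 (s : List Char) : pvGm 4 s ↔ ("verify".toList <:+: s ∨ "check".toList <:+: s ∨ "validate".toList <:+: s) := by
  unfold pvGm pvKdict; simp
lemma pvGm5 (s : List Char) : pvGm 5 s ↔ ("debug".toList <:+: s ∨ "diagnose".toList <:+: s) := by
  unfold pvGm pvKdict; simp
lemma pvGm6 (s : List Char) : pvGm 6 s ↔ "test".toList <:+: s := by
  unfold pvGm pvKdict; simp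

lemma pvGm_gt (q : Nat) (cs : List Char) (h : 7 ≤ q) : ¬ pvGm q cs := by
  rintro ⟨kw, hm, -⟩
  have := pvKdict_le_six _ hm
  omega

-- ===== VERDICT (by name: the statement is the Claim_ definition above) =====
theorem categorize_script_spec : Claim_equal_categorize_script := by
  intro file_name description _
  unfold Spec_categorize_script categorize_script categorize_script_alt
  simp only [List.any_cons, List.any_nil, Bool.or_eq_true, PySem.Str.isIn_iff_infix,
    Bool.or_false]
  set cs := (PySem.Str.lower file_name).toList with hcs
  rw [pvScan_eq, pvRunMin_none_eq_min?]
  by_cases h0 : pvGm 0 cs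
  · rw [pvAll_min_some h0 (fun q _ => Nat.zero_le q), if_pos ((pvGm0 cs).mp h0)]
    rfl
  by_cases h1 : pvGm 1 cs
  · have ub : ∀ q, pvGm q cs → 1 ≤ q := by
      intro q hq; by_contra hlt; push_neg at hlt; interval_cases q <;> tauto
    rw [pvAll_min_some h1 ub, if_neg (fun hc => h0 ((pvGm0 cs).mpr hc)),
      if_pos ((pvGm1 cs).mp h1)]
    rfl
  by_cases h2 : pvGm 2 cs
  · have ub : ∀ q, pvGm q cs → 2 ≤ q := by
      intro q hq; by_contra hlt; push_neg at hlt; interval_cases q <;> tauto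
    rw [pvAll_min_some h2 ub, if_neg (fun hc => h0 ((pvGm0 cs).mpr hc)),
      if_neg (fun hc => h1 ((pvGm1 cs).mpr hc)), if_pos ((pvGm2 cs).mp h2)]
    rfl
  by_cases h3 : pvGm 3 cs
  · have ub : ∀ q, pvGm q cs → 3 ≤ q := by
      intro q hq; by_contra hlt; push_neg at hlt; interval_cases q <;> tauto
    rw [pvAll_min_some h3 ub, if_neg (fun hc => h0 ((pvGm0 cs).mpr hc)),
      if_neg (fun hc => h1 ((pvGm1 cs).mpr hc)), if_neg (fun hc => h2 ((pvGm2 cs).mpr hc)),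
      if_pos ((pvGm3 cs).mp h3)]
    rfl
  by_cases h4 : pvGm 4 cs
  · have ub : ∀ q, pvGm q cs → 4 ≤ q := by
      intro q hq; by_contra hlt; push_neg at hlt; interval_cases q <;> tauto
    rw [pvAll_min_some h4 ub, if_neg (fun hc => h0 ((pvGm0 cs).mpr hc)),
      if_neg (fun hc => h1 ((pvGm1 cs).mpr hc)), if_neg (fun hc => h2 ((pvGm2 cs).mpr hc)),
      if_neg (fun hc => h3 ((pvGm3 cs).mpr hc)), if_pos ((pvGm4 cs).mp h4)]
    rfl
  by_cases h5 : pvGm 5 cs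
  · have ub : ∀ q, pvGm q cs → 5 ≤ q := by
      intro q hq; by_contra hlt; push_neg at hlt; interval_cases q <;> tauto
    rw [pvAll_min_some h5 ub, if_neg (fun hc => h0 ((pvGm0 cs).mpr hc)),
      if_neg (fun hc => h1 ((pvGm1 cs).mpr hc)), if_neg (fun hc => h2 ((pvGm2 cs).mpr hc)),
      if_neg (fun hc => h3 ((pvGm3 cs).mpr hc)), if_neg (fun hc => h4 ((pvGm4 cs).mpr hc)),
      if_pos ((pvGm5 cs).mp h5)]
    rfl
  by_cases h6 : pvGm 6 cs
  · have ub : ∀ q, pvGm q cs → 6 ≤ q := by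
      intro q hq; by_contra hlt; push_neg at hlt; interval_cases q <;> tauto
    rw [pvAll_min_some h6 ub, if_neg (fun hc => h0 ((pvGm0 cs).mpr hc)),
      if_neg (fun hc => h1 ((pvGm1 cs).mpr hc)), if_neg (fun hc => h2 ((pvGm2 cs).mpr hc)),
      if_neg (fun hc => h3 ((pvGm3 cs).mpr hc)), if_neg (fun hc => h4 ((pvGm4 cs).mpr hc)),
      if_neg (fun hc => h5 ((pvGm5 cs).mpr hc)), if_pos ((pvGm6 cs).mp h6)]
    rfl
  · have hnone : (pvAll cs).min? = none := by
      apply pvAll_min_none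
      intro q hq
      by_cases h7 : 7 ≤ q
      · exact pvGm_gt q cs h7 hq
      · push_neg at h7; interval_cases q <;> tauto
    rw [hnone, if_neg (fun hc => h0 ((pvGm0 cs).mpr hc)),
      if_neg (fun hc => h1 ((pvGm1 cs).mpr hc)), if_neg (fun hc => h2 ((pvGm2 cs).mpr hc)),
      if_neg (fun hc => h3 ((pvGm3 cs).mpr hc)), if_neg (fun hc => h4 ((pvGm4 cs).mpr hc)),
      if_neg (fun hc => h5 ((pvGm5 cs).mpr hc)), if_neg (fun hc => h6 ((pvGm6 cs).mpr hc))]
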